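-- pv_equiv track=rewrite | github.com/jaortiz92/prepareOrders | orders/utils/utils.py | sort_sizes
-- ===== SOURCE A (Python) =====
-- from typing import List, Any
--
-- SIZES_ALPHA = ['XS', 'S', 'RN', 'P', 'M', 'G', 'L', 'XL', 'XXL']
--
-- def sort_sizes(list_sizes: List[str]):
--     list_size_numeric: List[int] = []
--     list_size_alpha: List[str] = []
--     aux: List[str] = []
--
--     for size in list_sizes:
--         value = size
--         if value.isnumeric():
--             value = int(value)
--             list_size_numeric.append(value)
--         else:
--             list_size_alpha.append(value)
--
--     for i in range(len(SIZES_ALPHA)):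
--         if SIZES_ALPHA[i] in list_size_alpha:
--             aux.append(SIZES_ALPHA[i])
--
--     list_size_alpha = aux
--     list_size_numeric.sort()
--     list_size: List[Any] = list_size_alpha + list_size_numeric
--     list_size = list(map(str, list_size))
--     return list_size
-- ===== SOURCE B (Python) =====
-- from typing import List
--
-- SIZES_ALPHA = ['XS', 'S', 'RN', 'P', 'M', 'G', 'L', 'XL', 'XXL']
--
-- def sort_sizes(list_sizes: List[str]):
--     rank = {s: i for i, s in enumerate(SIZES_ALPHA)}
--     alpha = sorted({s for s in list_sizes if s in rank}, key=rank.get)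
--     numeric = sorted(int(s) for s in list_sizes if s.isnumeric())
--     return list(map(str, alpha + numeric))
-- ===== Notes on version B (the rewrite author's own statement) =====
-- stated objective: idiomatic
-- what changed: Replaces the two-pass append-and-rescan (collect alpha tokens, then scan SIZES_ALPHA testing list membership to rebuild the order) by a rank dictionary: filter-and-dedup via a set comprehension, then one sort keyed by rank, plus a direct sorted() of the numeric tokens.
import Mathlib
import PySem

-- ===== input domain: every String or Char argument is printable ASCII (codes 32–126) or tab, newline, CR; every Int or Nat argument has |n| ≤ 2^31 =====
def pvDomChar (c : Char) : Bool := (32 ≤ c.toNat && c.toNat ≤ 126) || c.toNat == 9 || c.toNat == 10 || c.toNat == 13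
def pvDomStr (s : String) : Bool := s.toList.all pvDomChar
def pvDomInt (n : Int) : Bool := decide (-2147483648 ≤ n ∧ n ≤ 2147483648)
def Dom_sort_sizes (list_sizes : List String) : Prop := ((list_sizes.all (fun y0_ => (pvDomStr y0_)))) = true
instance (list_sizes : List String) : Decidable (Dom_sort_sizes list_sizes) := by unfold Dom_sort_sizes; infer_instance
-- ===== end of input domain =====

-- B replaces A's append-and-rescan over the 9-bucket list by a rank dictionary with one
-- sort keyed by rank (idiomatic, not claimed faster).  .isnumeric() is exact on the ASCII
-- domain as PySem.Str.strIsdigit; int(s) on such a string always succeeds, so ofStr? is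
-- unwrapped with getD 0 (the default arm is unreachable); str() on the string half of the
-- mixed list is the identity and is ported as such.

-- ===== PORT A =====
def pySizesAlpha : List String := ["XS", "S", "RN", "P", "M", "G", "L", "XL", "XXL"]

def sort_sizes (list_sizes : List String) : List String :=
  -- first loop: split into numeric (as ints) and alpha, appending in order
  let p := list_sizes.foldl
    (fun (p : List Int × List String) size =>
      if PySem.Str.strIsdigit size then
        (p.1 ++ [(PySem.Int.ofStr? size).getD 0], p.2)
      else
        (p.1, p.2 ++ [size]))
    ([], [])
  -- second loop over range(len(SIZES_ALPHA)): membership rescan of the alpha list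
  let aux := pySizesAlpha.foldl
    (fun acc s => if s ∈ p.2 then acc ++ [s] else acc) []
  -- list_size_numeric.sort(); list(map(str, alpha + numeric))
  aux ++ (PySem.List.sorted p.1 (fun x => x) false).map PySem.Int.toStr

-- ===== PORT B =====
-- rank = {s: i for i, s in enumerate(SIZES_ALPHA)}
def sortAltRank : PySem.Dict String Int :=
  (PySem.List.enumerate pySizesAlpha).foldl
    (fun d q => PySem.Dict.insert d q.2 q.1) PySem.Dict.empty

def sort_sizes_alt (list_sizes : List String) : List String :=
  -- alpha = sorted({s for s in list_sizes if s in rank}, key=rank.get)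
  -- (rank.get always returns an int on the filtered keys; ported as getD _ 0)
  let alpha := PySem.List.sorted
    (PySem.Set.ofList (list_sizes.filter (fun s => PySem.Dict.contains sortAltRank s)))
    (fun s => PySem.Dict.getD sortAltRank s 0) false
  -- numeric = sorted(int(s) for s in list_sizes if s.isnumeric())
  let numeric := PySem.List.sorted
    ((list_sizes.filter (fun s => PySem.Str.strIsdigit s)).map
      (fun s => (PySem.Int.ofStr? s).getD 0))
    (fun x => x) false
  alpha ++ numeric.map PySem.Int.toStr

-- ===== PRECONDITION & SPEC =====
def Spec_sort_sizes (list_sizes : List String) (out : List String) : Prop := out = sort_sizes_alt list_sizes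
instance (list_sizes : List String) (out : List String) : Decidable (Spec_sort_sizes list_sizes out) := by unfold Spec_sort_sizes; infer_instance

-- ===== CLAIM (what is proved, stated in full; the proofs are below) =====
def Claim_equal_sort_sizes : Prop := ∀ (list_sizes : List String), Dom_sort_sizes list_sizes → Spec_sort_sizes list_sizes (sort_sizes list_sizes)

-- ===== LEMMAS AND PROOFS =====

-- A's first loop splits the input into the digit half (mapped through int) and the rest.
theorem foldA_split (ls : List String) (n : List Int) (a : List String) :
    ls.foldl
      (fun (p : List Int × List String) size =>
        if PySem.Str.strIsdigit size then
          (p.1 ++ [(PySem.Int.ofStr? size).getD 0], p.2)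
        else
          (p.1, p.2 ++ [size])) (n, a)
    = (n ++ (ls.filter (fun s => PySem.Str.strIsdigit s)).map
            (fun s => (PySem.Int.ofStr? s).getD 0),
       a ++ ls.filter (fun s => ¬ PySem.Str.strIsdigit s)) := by
  induction ls generalizing n a with
  | nil => simp
  | cons x xs ih =>
    rw [List.foldl_cons]
    by_cases hx : PySem.Str.strIsdigit x
    · rw [if_pos hx, ih]
      simp only [PySem.Str.strIsdigit_eq] at hx
      simp [hx]
    · rw [if_neg hx, ih]
      simp only [PySem.Str.strIsdigit_eq] at hx
      simp [hx]

-- A's second loop is a filter of SIZES_ALPHA.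
theorem foldAux_filter (xs : List String) (acc : List String) (A : List String) :
    A.foldl (fun acc s => if s ∈ xs then acc ++ [s] else acc) acc
    = acc ++ A.filter (fun s => s ∈ xs) := by
  induction A generalizing acc with
  | nil => simp
  | cons y ys ih =>
    by_cases hy : y ∈ xs
    · simp [List.foldl_cons, hy, ih]
    · simp [List.foldl_cons, hy, ih]

-- membership in the rank dict = membership in SIZES_ALPHA
theorem contains_rank_iff (s : String) :
    PySem.Dict.contains sortAltRank s = true ↔ s ∈ pySizesAlpha := by
  simp [sortAltRank, pySizesAlpha, PySem.List.enumerate, PySem.Dict.contains,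
    PySem.Dict.insert, PySem.Dict.empty, List.foldl]
  constructor
  · rintro (h | h | h | h | h | h | h | h | h) <;> simp_all
  · rintro (h | h | h | h | h | h | h | h | h) <;> simp_all

-- no SIZES_ALPHA label is a digit string
theorem alpha_not_digit (s : String) (hs : s ∈ pySizesAlpha) :
    PySem.Str.strIsdigit s = false := by
  fin_cases hs <;> decide

-- B's sorted-by-rank of the deduped alpha set names A's canonical filter of SIZES_ALPHA
theorem alpha_eq (ls : List String) :
    PySem.List.sorted
      (PySem.Set.ofList (ls.filter (fun s => PySem.Dict.contains sortAltRank s)))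
      (fun s => PySem.Dict.getD sortAltRank s 0) false
    = pySizesAlpha.filter (fun s => s ∈ ls.filter (fun t => ¬ PySem.Str.strIsdigit t)) := by
  apply PySem.List.sorted_eq_of_perm_of_pairwise_lt
  · rw [List.perm_ext_iff_of_nodup
      (List.Nodup.filter _ (by decide : pySizesAlpha.Nodup)) (PySem.Set.nodup_ofList _)]
    intro a
    constructor
    · intro h
      rcases List.mem_filter.mp h with ⟨hA, hmem⟩
      have hmem' : a ∈ ls.filter (fun t => ¬ PySem.Str.strIsdigit t) := by simpa using hmem
      have hls : a ∈ ls := (List.mem_filter.mp hmem').1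
      rw [PySem.Set.mem_ofList]
      exact List.mem_filter.mpr ⟨hls, by simp [(contains_rank_iff a).mpr hA]⟩
    · intro h
      rw [PySem.Set.mem_ofList] at h
      rcases List.mem_filter.mp h with ⟨hls, hct⟩
      have hA : a ∈ pySizesAlpha := (contains_rank_iff a).mp (by simpa using hct)
      refine List.mem_filter.mpr ⟨hA, ?_⟩
      simp only [decide_eq_true_eq]
      exact List.mem_filter.mpr ⟨hls, by have := alpha_not_digit a hA; simpa using this⟩
  · exact List.Pairwise.sublist List.filter_sublist
      (by decide : pySizesAlpha.Pairwise
        (fun a b => PySem.Dict.getD sortAltRank a 0 < PySem.Dict.getD sortAltRank b 0))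

theorem verdict (ls : List String) : sort_sizes ls = sort_sizes_alt ls := by
  unfold sort_sizes sort_sizes_alt
  rw [foldA_split]
  simp only [foldAux_filter, alpha_eq]
  simp

-- ===== VERDICT (by name: the statement is the Claim_ definition above) =====
theorem sort_sizes_spec : Claim_equal_sort_sizes := by
  intro ls _
  unfold Spec_sort_sizes
  exact verdict ls
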